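-- pv_equiv track=rewrite | github.com/shawn922003/cvsd_final | python_sim/bch_sim_1023_983/gen_patterns_1023.py | encode_with_generator
-- ===== SOURCE A (Python) =====
-- from typing import List, Tuple
-- from typing import List, Tuple
--
-- def encode_with_generator(tx: List[int], GENERATOR_POLY: List[int], N: int) -> List[int]:
--     res = [0] * (len(tx) + len(GENERATOR_POLY) - 1)
--     for i, a in enumerate(tx):
--         if a & 1:
--             for j, b in enumerate(GENERATOR_POLY):
--                 if b & 1:
--                     res[i + j] ^= 1
--     return res[:N]
-- ===== SOURCE B (Python) =====
-- from typing import List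
--
--
-- def encode_with_generator(tx: List[int], GENERATOR_POLY: List[int], N: int) -> List[int]:
--     # Output-driven gather: compute each output bit as a parity accumulator,
--     # instead of scattering toggles into a shared buffer.
--     t, g = len(tx), len(GENERATOR_POLY)
--     res = []
--     for k in range(t + g - 1):
--         bit = 0
--         for i in range(t):
--             if i <= k and k - i < g:
--                 bit ^= tx[i] & GENERATOR_POLY[k - i] & 1
--         res.append(bit)
--     return res[:N]
-- ===== Notes on version B (the rewrite author's own statement) =====
-- stated objective: alternative
-- what changed: Replaced A's input-driven scatter (toggling bits of a shared result buffer in place, guarded by tx[i]&1) with an output-driven gather that computes each output position as its own parity accumulator over the convolution terms tx[i]&G[k-i]&1, appending results in order.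
import Mathlib
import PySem

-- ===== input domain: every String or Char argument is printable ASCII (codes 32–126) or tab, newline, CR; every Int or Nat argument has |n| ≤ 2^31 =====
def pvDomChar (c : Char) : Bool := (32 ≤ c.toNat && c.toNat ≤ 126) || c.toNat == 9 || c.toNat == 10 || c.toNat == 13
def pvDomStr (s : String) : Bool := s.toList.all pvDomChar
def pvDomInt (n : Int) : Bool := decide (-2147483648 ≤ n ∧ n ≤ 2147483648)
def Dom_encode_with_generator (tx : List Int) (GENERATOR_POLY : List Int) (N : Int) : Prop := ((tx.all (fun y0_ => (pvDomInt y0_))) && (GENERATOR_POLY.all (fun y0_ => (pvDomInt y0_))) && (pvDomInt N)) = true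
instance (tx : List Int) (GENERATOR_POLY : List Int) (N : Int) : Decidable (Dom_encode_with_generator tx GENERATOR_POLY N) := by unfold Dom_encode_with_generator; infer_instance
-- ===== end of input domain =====

-- B replaces A's input-driven scatter into a shared buffer by an output-driven
-- per-bit parity gather (alternative decomposition, same cost class).

-- ===== PORT A =====
-- inner loop: `for j, b in enumerate(GENERATOR_POLY): if b & 1: res[i+j] ^= 1`
def pvInnerA (gs : List Int) (i j : Nat) (res : List Int) : List Int :=
  match gs with
  | [] => res
  | b :: gs' =>
      pvInnerA gs' i (j + 1)
        (if PySem.Int.band b 1 ≠ 0 then res.set (i + j) (PySem.Int.bxor (res.getD (i + j) 0) 1) else res)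

-- outer loop: `for i, a in enumerate(tx): if a & 1: <inner loop>`
def pvOuterA (ts gs : List Int) (i : Nat) (res : List Int) : List Int :=
  match ts with
  | [] => res
  | a :: ts' => pvOuterA ts' gs (i + 1) (if PySem.Int.band a 1 ≠ 0 then pvInnerA gs i 0 res else res)

def encode_with_generator (tx : List Int) (GENERATOR_POLY : List Int) (N : Int) : List Int :=
  PySem.List.slice
    (pvOuterA tx GENERATOR_POLY 0 (List.replicate (tx.length + GENERATOR_POLY.length - 1) (0 : Int)))
    none (some N)

-- ===== PORT B =====
-- inner loop of Source B: `for i in range(t): if i <= k and k - i < g: bit ^= tx[i] & GENERATOR_POLY[k-i] & 1`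
def pvGatherBit (tx gs : List Int) (k : Nat) : Int :=
  (List.range tx.length).foldl
    (fun bit i =>
      if i ≤ k ∧ k - i < gs.length then
        PySem.Int.bxor bit (PySem.Int.band (PySem.Int.band (tx.getD i 0) (gs.getD (k - i) 0)) 1)
      else bit) 0

def encode_with_generator_alt (tx : List Int) (GENERATOR_POLY : List Int) (N : Int) : List Int :=
  PySem.List.slice
    ((List.range (tx.length + GENERATOR_POLY.length - 1)).map (pvGatherBit tx GENERATOR_POLY))
    none (some N)

-- ===== PRECONDITION & SPEC =====
def Spec_encode_with_generator (tx : List Int) (GENERATOR_POLY : List Int) (N : Int) (out : List Int) : Prop := out = encode_with_generator_alt tx GENERATOR_POLY N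
instance (tx : List Int) (GENERATOR_POLY : List Int) (N : Int) (out : List Int) : Decidable (Spec_encode_with_generator tx GENERATOR_POLY N out) := by unfold Spec_encode_with_generator; infer_instance

-- ===== CLAIM (what is proved, stated in full; the proofs are below) =====
def Claim_equal_encode_with_generator : Prop := ∀ (tx : List Int) (GENERATOR_POLY : List Int) (N : Int), Dom_encode_with_generator tx GENERATOR_POLY N → Spec_encode_with_generator tx GENERATOR_POLY N (encode_with_generator tx GENERATOR_POLY N)

-- ===== LEMMAS AND PROOFS =====

-- parity of a Nat &&&: last bit of an AND is the product of the last bits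
theorem pv_nat_and_parity (m n : Nat) : (m &&& n) % 2 = (m % 2) * (n % 2) := by
  have h := Nat.testBit_and m n 0
  simp only [Nat.testBit_zero, ← Bool.decide_and, decide_eq_decide] at h
  rcases Nat.mod_two_eq_zero_or_one m with hm | hm <;>
    rcases Nat.mod_two_eq_zero_or_one n with hn | hn <;> rw [hm, hn] <;> omega

theorem pv_nat_or_parity (m n : Nat) :
    (m ||| n) % 2 = (m % 2) + (n % 2) - (m % 2) * (n % 2) := by
  have h := Nat.testBit_or m n 0
  simp only [Nat.testBit_zero, ← Bool.decide_or, decide_eq_decide] at h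
  rcases Nat.mod_two_eq_zero_or_one m with hm | hm <;>
    rcases Nat.mod_two_eq_zero_or_one n with hn | hn <;> rw [hm, hn] <;> omega

-- last bit of `a & b` from the last bits of a and b (Python &, PySem.Int.band)
theorem pv_band_parity (a b : Int) :
    PySem.Int.band (PySem.Int.band a b) 1 =
      if PySem.Int.band a 1 = 0 then 0 else PySem.Int.band b 1 := by
  have h2 : (0 : Int) < 2 := by norm_num
  rw [PySem.Int.band_one, PySem.Int.band_one, PySem.Int.band_one,
      PySem.Int.mod_eq_emod_of_pos h2, PySem.Int.mod_eq_emod_of_pos h2,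
      PySem.Int.mod_eq_emod_of_pos h2]
  unfold PySem.Int.band
  by_cases ha : 0 ≤ a <;> by_cases hb : 0 ≤ b
  · rw [if_pos ha, if_pos hb]
    have hand := pv_nat_and_parity a.toNat b.toNat
    rcases Nat.mod_two_eq_zero_or_one a.toNat with hm | hm <;>
      rcases Nat.mod_two_eq_zero_or_one b.toNat with hn | hn <;>
        rw [hm, hn] at hand <;> split_ifs <;> omega
  · rw [if_pos ha, if_neg hb]
    have hand := pv_nat_and_parity a.toNat (-b - 1).toNat
    have hle : a.toNat &&& (-b - 1).toNat ≤ a.toNat := Nat.and_le_left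
    rcases Nat.mod_two_eq_zero_or_one a.toNat with hm | hm <;>
      rcases Nat.mod_two_eq_zero_or_one (-b - 1).toNat with hn | hn <;>
        rw [hm, hn] at hand <;> split_ifs <;> omega
  · rw [if_neg ha, if_pos hb]
    have hand := pv_nat_and_parity b.toNat (-a - 1).toNat
    have hle : b.toNat &&& (-a - 1).toNat ≤ b.toNat := Nat.and_le_left
    rcases Nat.mod_two_eq_zero_or_one b.toNat with hm | hm <;>
      rcases Nat.mod_two_eq_zero_or_one (-a - 1).toNat with hn | hn <;>
        rw [hm, hn] at hand <;> split_ifs <;> omega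
  · rw [if_neg ha, if_neg hb]
    have hand := pv_nat_or_parity (-a - 1).toNat (-b - 1).toNat
    rcases Nat.mod_two_eq_zero_or_one (-a - 1).toNat with hm | hm <;>
      rcases Nat.mod_two_eq_zero_or_one (-b - 1).toNat with hn | hn <;>
        rw [hm, hn] at hand <;> split_ifs <;> omega

theorem pv_band_one_cases (a : Int) : PySem.Int.band a 1 = 0 ∨ PySem.Int.band a 1 = 1 := by
  rw [PySem.Int.band_one]; exact PySem.Int.mod_two_eq a

-- the single contribution of tx element `a` (at position i) to output bit k, as A computes it
def pvTerm (a : Int) (gs : List Int) (i k : Nat) : Int :=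
  if PySem.Int.band a 1 ≠ 0 ∧ i ≤ k ∧ k < i + gs.length then
    PySem.Int.band (gs.getD (k - i) 0) 1
  else 0

theorem pvInnerA_length (gs : List Int) (i j : Nat) (res : List Int) :
    (pvInnerA gs i j res).length = res.length := by
  induction gs generalizing j res with
  | nil => rfl
  | cons b gs' ih => simp only [pvInnerA]; rw [ih]; split <;> simp

theorem pvOuterA_length (ts gs : List Int) (i : Nat) (res : List Int) :
    (pvOuterA ts gs i res).length = res.length := by
  induction ts generalizing i res with
  | nil => rfl
  | cons a ts' ih =>
      simp only [pvOuterA]; rw [ih]; split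
      · exact pvInnerA_length gs i 0 res
      · rfl

theorem pvInnerA_getD (gs : List Int) (i j k : Nat) (res : List Int) :
    (pvInnerA gs i j res).getD k 0 =
      if i + j ≤ k ∧ k < i + j + gs.length ∧ k < res.length then
        PySem.Int.bxor (res.getD k 0) (PySem.Int.band (gs.getD (k - (i + j)) 0) 1)
      else res.getD k 0 := by
  induction gs generalizing j res with
  | nil =>
      simp only [pvInnerA, List.length_nil]
      rw [if_neg (by omega)]
  | cons b gs' ih =>
      simp only [pvInnerA]
      rcases pv_band_one_cases b with hb | hb
      · rw [if_neg (not_not_intro hb), ih]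
        by_cases h2 : k = i + j
        · subst h2
          rw [if_neg (by omega)]
          simp only [List.length_cons, Nat.sub_self, List.getD_cons_zero, hb,
            PySem.Int.bxor_zero, ite_self]
        · by_cases h1 : i + j ≤ k
          · rw [show k - (i + j) = (k - (i + (j + 1))) + 1 from by omega,
                List.getD_cons_succ, List.length_cons]
            exact if_congr (by omega) rfl rfl
          · rw [if_neg (by omega), if_neg (by omega)]
      · have hbne : PySem.Int.band b 1 ≠ 0 := by rw [hb]; norm_num
        rw [if_pos hbne, ih]
        simp only [List.length_set, List.length_cons]
        by_cases h2 : k = i + j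
        · subst h2
          rw [if_neg (by omega)]
          simp only [Nat.sub_self, List.getD_cons_zero, hb]
          by_cases hkl : i + j < res.length
          · rw [if_pos ⟨le_refl _, by omega, hkl⟩]
            simp [List.getD_eq_getElem?_getD, List.getElem?_set_self hkl]
          · rw [if_neg (fun h => hkl h.2.2)]
            simp only [List.getD_eq_getElem?_getD]
            rw [List.getElem?_set, if_pos rfl, if_neg hkl,
                List.getElem?_eq_none (by omega)]
        · have hres : (res.set (i + j) (PySem.Int.bxor (res.getD (i + j) 0) 1)).getD k 0
              = res.getD k 0 := by
            simp [List.getD_eq_getElem?_getD, List.getElem?_set_ne (show i + j ≠ k by omega)]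
          rw [hres]
          by_cases h1 : i + j ≤ k
          · rw [show k - (i + j) = (k - (i + (j + 1))) + 1 from by omega,
                List.getD_cons_succ]
            exact if_congr (by omega) rfl rfl
          · rw [if_neg (by omega), if_neg (by omega)]

theorem pvOuterA_getD (ts gs : List Int) (i k : Nat) (res : List Int) (hk : k < res.length) :
    (pvOuterA ts gs i res).getD k 0 =
      (List.range ts.length).foldl
        (fun v m => PySem.Int.bxor v (pvTerm (ts.getD m 0) gs (i + m) k)) (res.getD k 0) := by
  induction ts generalizing i res with
  | nil => simp [pvOuterA]
  | cons a ts' ih =>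
      simp only [pvOuterA, List.length_cons]
      have hlen' :
          (if PySem.Int.band a 1 ≠ 0 then pvInnerA gs i 0 res else res).length = res.length := by
        split
        · exact pvInnerA_length gs i 0 res
        · rfl
      rw [ih (i + 1) _ (by rw [hlen']; exact hk)]
      have hinit :
          (if PySem.Int.band a 1 ≠ 0 then pvInnerA gs i 0 res else res).getD k 0 =
            PySem.Int.bxor (res.getD k 0) (pvTerm ((a :: ts').getD 0 0) gs (i + 0) k) := by
        simp only [List.getD_cons_zero, Nat.add_zero]
        unfold pvTerm
        split
        · rw [pvInnerA_getD]
          simp only [Nat.add_zero]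
          by_cases hc : i ≤ k ∧ k < i + gs.length
          · rw [if_pos ⟨hc.1, hc.2, hk⟩, if_pos ⟨by assumption, hc.1, hc.2⟩]
          · rw [if_neg (fun h => hc ⟨h.1, h.2.1⟩), if_neg (fun h => hc ⟨h.2.1, h.2.2⟩),
                PySem.Int.bxor_zero]
        · rw [if_neg (by tauto), PySem.Int.bxor_zero]
      rw [List.range_succ_eq_map]
      simp only [List.foldl_cons, List.foldl_map]
      rw [hinit]
      congr 1
      funext v m
      simp only [Nat.succ_eq_add_one, List.getD_cons_succ]
      rw [show i + (m + 1) = i + 1 + m from by omega]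

theorem pvGatherBit_eq (tx gs : List Int) (k : Nat) :
    pvGatherBit tx gs k =
      (List.range tx.length).foldl
        (fun v m => PySem.Int.bxor v (pvTerm (tx.getD m 0) gs (0 + m) k)) 0 := by
  unfold pvGatherBit
  have hfun :
      (fun (bit : Int) (i : Nat) =>
          if i ≤ k ∧ k - i < gs.length then
            PySem.Int.bxor bit
              (PySem.Int.band (PySem.Int.band (tx.getD i 0) (gs.getD (k - i) 0)) 1)
          else bit) =
        fun (v : Int) (m : Nat) => PySem.Int.bxor v (pvTerm (tx.getD m 0) gs (0 + m) k) := by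
    funext bit m
    simp only [Nat.zero_add]
    unfold pvTerm
    by_cases hc : m ≤ k ∧ k - m < gs.length
    · rw [if_pos hc, pv_band_parity]
      by_cases hb : PySem.Int.band (tx.getD m 0) 1 = 0
      · rw [if_pos hb, if_neg (fun h => h.1 hb), PySem.Int.bxor_zero]
      · rw [if_neg hb, if_pos ⟨hb, hc.1, by omega⟩]
    · rw [if_neg hc, if_neg (fun h => hc ⟨h.2.1, by omega⟩), PySem.Int.bxor_zero]
  rw [hfun]

theorem pv_pre_slice_eq (tx gs : List Int) :
    pvOuterA tx gs 0 (List.replicate (tx.length + gs.length - 1) (0 : Int)) =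
      (List.range (tx.length + gs.length - 1)).map (pvGatherBit tx gs) := by
  apply List.ext_getElem
  · rw [pvOuterA_length]
    simp
  · intro k h1 h2
    have hkL : k < tx.length + gs.length - 1 := by simpa using h2
    have hR : (List.map (pvGatherBit tx gs) (List.range (tx.length + gs.length - 1))).getD k 0
        = pvGatherBit tx gs k := by
      rw [List.getD_eq_getElem?_getD, List.getElem?_map, List.getElem?_range hkL]
      rfl
    rw [← List.getD_eq_getElem _ 0 h1, ← List.getD_eq_getElem _ 0 h2,
        pvOuterA_getD tx gs 0 k _ (by simpa using hkL), hR, pvGatherBit_eq,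
        List.getD_replicate 0 hkL]
-- ===== VERDICT (by name: the statement is the Claim_ definition above) =====
theorem encode_with_generator_spec : Claim_equal_encode_with_generator := by
  intro tx gs N _
  unfold Spec_encode_with_generator encode_with_generator encode_with_generator_alt
  rw [pv_pre_slice_eq]
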